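-- pv_equiv track=rewrite | github.com/axeven/codeforces | src/cf680/E.py | compute
-- ===== SOURCE A (Python) =====
-- def compute(n, k, map):
--     max_comp_size = 0
--     for start_row in range(0, n - k + 1):
--         for start_col in range(0, n - k + 1):
--             comp_size = k * k
--             added_to_queue = [([False] * n) for i in range(n)]
--             for row in range(start_row, min(start_row + k, n)):
--                 for col in range(start_col, min(start_col + k, n)):
--                     added_to_queue[row][col] = True
--             queue_row = []
--             queue_col = []
--             for col in range(start_col, min(start_col + k, n)):
--                 if start_row - 1 >= 0:
--                     if map[start_row - 1][col] == '.':
--                         queue_row.append(start_row - 1)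
--                         queue_col.append(col)
--                         added_to_queue[start_row - 1][col] = True
--                         comp_size += 1
--                 if start_row + k < n:
--                     if map[start_row + k][col] == '.':
--                         queue_row.append(start_row + k)
--                         queue_col.append(col)
--                         added_to_queue[start_row + k][col] = True
--                         comp_size += 1
--             for row in range(start_row, min(start_row + k, n)):
--                 if start_col - 1 >= 0:
--                     if map[row][start_col - 1] == '.':
--                         queue_row.append(row)
--                         queue_col.append(start_col - 1)
--                         added_to_queue[row][start_col - 1] = True
--                         comp_size += 1
--                 if start_col + k < n:
--                     if map[row][start_col + k] == '.':
--                         queue_row.append(row)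
--                         queue_col.append(start_col + k)
--                         added_to_queue[row][start_col + k] = True
--                         comp_size += 1
--             while len(queue_col) > 0:
--                 next_queue_row = []
--                 next_queue_col = []
--                 for i in range(len(queue_col)):
--                     x = queue_row[i]
--                     y = queue_col[i]
--                     if x > 0 and not added_to_queue[x - 1][y] and map[x - 1][y] == '.':
--                         next_queue_row.append(x - 1)
--                         next_queue_col.append(y)
--                         added_to_queue[x - 1][y] = True
--                         comp_size += 1
--                     if x + 1 < n and not added_to_queue[x + 1][y] and map[x + 1][y] == '.':
--                         next_queue_row.append(x + 1)
--                         next_queue_col.append(y)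
--                         added_to_queue[x + 1][y] = True
--                         comp_size += 1
--                     if y > 0 and not added_to_queue[x][y - 1] and map[x][y - 1] == '.':
--                         next_queue_row.append(x)
--                         next_queue_col.append(y - 1)
--                         added_to_queue[x][y - 1] = True
--                         comp_size += 1
--                     if y + 1 < n and not added_to_queue[x][y + 1] and map[x][y + 1] == '.':
--                         next_queue_row.append(x)
--                         next_queue_col.append(y + 1)
--                         added_to_queue[x][y + 1] = True
--                         comp_size += 1
--                 queue_row = next_queue_row
--                 queue_col = next_queue_col
--             max_comp_size = max(max_comp_size, comp_size)
--     return max_comp_size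
-- ===== SOURCE B (Python) =====
-- def compute(n, k, map):
--     def ok(x, y, r0, c0):
--         return (0 <= x < n and 0 <= y < n
--                 and not (r0 <= x < r0 + k and c0 <= y < c0 + k)
--                 and map[x][y] == '.')
--
--     best = 0
--     for r0 in range(0, n - k + 1):
--         for c0 in range(0, n - k + 1):
--             # seeds: free cells on the ring just outside the square
--             visited = set()
--             for c in range(c0, min(c0 + k, n)):
--                 for p in ((r0 - 1, c), (r0 + k, c)):
--                     if ok(p[0], p[1], r0, c0):
--                         visited.add(p)
--             for r in range(r0, min(r0 + k, n)):
--                 for p in ((r, c0 - 1), (r, c0 + k)):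
--                     if ok(p[0], p[1], r0, c0):
--                         visited.add(p)
--             # saturate: repeatedly add every free neighbour of the whole set
--             for _ in range(n * n + 1):
--                 new = set()
--                 for (x, y) in visited:
--                     for q in ((x - 1, y), (x + 1, y), (x, y - 1), (x, y + 1)):
--                         if ok(q[0], q[1], r0, c0) and q not in visited:
--                             new.add(q)
--                 if not new:
--                     break
--                 visited |= new
--             best = max(best, k * k + len(visited))
--     return best
-- ===== Notes on version B (the rewrite author's own statement) =====
-- stated objective: alternative
-- what changed: Per square placement, B replaces A's level-by-level BFS (two parallel coordinate queues plus an n*n boolean matrix rebuilt per square) by a set-based fixed-point saturation that repeatedly adds every free neighbour of the whole visited set until nothing changes, then takes k*k + len(visited).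
-- outside the precondition, e.g. on compute(1, 1, []): A returns 1, B returns 1; on compute(2, 2, []): A returns 4, B returns 4
import Mathlib
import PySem

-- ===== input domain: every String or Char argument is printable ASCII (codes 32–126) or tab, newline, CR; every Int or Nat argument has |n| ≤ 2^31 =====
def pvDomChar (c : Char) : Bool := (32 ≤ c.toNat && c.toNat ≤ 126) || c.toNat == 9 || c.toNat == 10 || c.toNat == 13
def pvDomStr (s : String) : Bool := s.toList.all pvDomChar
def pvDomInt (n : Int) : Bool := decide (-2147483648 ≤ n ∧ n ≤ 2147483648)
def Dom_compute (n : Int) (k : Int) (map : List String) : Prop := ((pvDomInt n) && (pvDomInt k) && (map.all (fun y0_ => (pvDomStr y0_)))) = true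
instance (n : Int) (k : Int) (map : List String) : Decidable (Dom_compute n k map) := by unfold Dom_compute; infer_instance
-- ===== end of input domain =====

-- B replaces A's per-square level-BFS (two parallel coordinate queues plus a boolean
-- matrix) by a set-based fixed-point saturation (repeatedly add every free neighbour of
-- the whole visited set); objective: alternative algorithm, not claimed faster.

-- ===== PORT A =====
-- map[x][y] == '.'  (both Pythons read the grid only through this expression)
def pvDot (map : List String) (x y : Int) : Bool :=
  PySem.List.pyGetD (PySem.List.pyGetD map x "").toList y ' ' == '.'

-- added_to_queue[r][c] = True  (in-place update of the nested list)
def pvMark (ad : List (List Bool)) (r c : Int) : List (List Bool) :=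
  PySem.List.pySetD ad r (PySem.List.pySetD (PySem.List.pyGetD ad r []) c true)

-- added_to_queue[x][y]  (read)
def pvMget (ad : List (List Bool)) (x y : Int) : Bool :=
  PySem.List.pyGetD (PySem.List.pyGetD ad x []) y false

-- A's mutable per-square state: queue_row, queue_col, added_to_queue, comp_size
structure PvA where
  qr : List Int
  qc : List Int
  ad : List (List Bool)
  comp : Int

-- body of A's first seed loop (one column: the start_row-1 block, then the start_row+k block)
def pvASeedTop (n k : Int) (map : List String) (r0 c0 : Int) (s : PvA) (c : Int) : PvA :=
  let s1 :=
    if r0 - 1 ≥ 0 then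
      if pvDot map (r0 - 1) c then
        ⟨s.qr ++ [r0 - 1], s.qc ++ [c], pvMark s.ad (r0 - 1) c, s.comp + 1⟩
      else s
    else s
  if r0 + k < n then
    if pvDot map (r0 + k) c then
      ⟨s1.qr ++ [r0 + k], s1.qc ++ [c], pvMark s1.ad (r0 + k) c, s1.comp + 1⟩
    else s1
  else s1

-- body of A's second seed loop (one row: the start_col-1 block, then the start_col+k block)
def pvASeedSide (n k : Int) (map : List String) (r0 c0 : Int) (s : PvA) (r : Int) : PvA :=
  let s1 :=
    if c0 - 1 ≥ 0 then
      if pvDot map r (c0 - 1) then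
        ⟨s.qr ++ [r], s.qc ++ [c0 - 1], pvMark s.ad r (c0 - 1), s.comp + 1⟩
      else s
    else s
  if c0 + k < n then
    if pvDot map r (c0 + k) then
      ⟨s1.qr ++ [r], s1.qc ++ [c0 + k], pvMark s1.ad r (c0 + k), s1.comp + 1⟩
    else s1
  else s1

-- body of A's while-loop inner for-loop, after x = queue_row[i]; y = queue_col[i]
def pvAStepXY (n : Int) (map : List String) (x y : Int) (s : PvA) : PvA :=
  let s1 :=
    if x > 0 && !(pvMget s.ad (x - 1) y) && pvDot map (x - 1) y then
      ⟨s.qr ++ [x - 1], s.qc ++ [y], pvMark s.ad (x - 1) y, s.comp + 1⟩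
    else s
  let s2 :=
    if x + 1 < n && !(pvMget s1.ad (x + 1) y) && pvDot map (x + 1) y then
      ⟨s1.qr ++ [x + 1], s1.qc ++ [y], pvMark s1.ad (x + 1) y, s1.comp + 1⟩
    else s1
  let s3 :=
    if y > 0 && !(pvMget s2.ad x (y - 1)) && pvDot map x (y - 1) then
      ⟨s2.qr ++ [x], s2.qc ++ [y - 1], pvMark s2.ad x (y - 1), s2.comp + 1⟩
    else s2
  if y + 1 < n && !(pvMget s3.ad x (y + 1)) && pvDot map x (y + 1) then
    ⟨s3.qr ++ [x], s3.qc ++ [y + 1], pvMark s3.ad x (y + 1), s3.comp + 1⟩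
  else s3

-- one iteration of A's while-loop (one BFS level)
def pvALevel (n : Int) (map : List String) (s : PvA) : PvA :=
  (PySem.List.pyRange 0 (PySem.List.len s.qc)).foldl
    (fun acc i => pvAStepXY n map (PySem.List.pyGetD s.qr i 0) (PySem.List.pyGetD s.qc i 0) acc)
    ⟨[], [], s.ad, s.comp⟩

-- A's while-loop (fuel = totality guard only; Python's loop ends within n*n+1 levels)
def pvABfs (n : Int) (map : List String) : Nat → PvA → Int
  | 0, s => s.comp
  | fuel + 1, s =>
    if PySem.List.len s.qc > 0 then pvABfs n map fuel (pvALevel n map s) else s.comp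

-- A's whole loop body for one placement (start_row, start_col)
def pvASquare (n k : Int) (map : List String) (r0 c0 : Int) : Int :=
  let ad0 : List (List Bool) := (PySem.List.pyRange 0 n).map (fun _ => List.replicate n.toNat false)
  let ad1 := (PySem.List.pyRange r0 (min (r0 + k) n)).foldl
      (fun ad row => (PySem.List.pyRange c0 (min (c0 + k) n)).foldl
        (fun ad2 col => pvMark ad2 row col) ad) ad0
  let s1 := (PySem.List.pyRange c0 (min (c0 + k) n)).foldl (pvASeedTop n k map r0 c0)
      ⟨[], [], ad1, k * k⟩
  let s2 := (PySem.List.pyRange r0 (min (r0 + k) n)).foldl (pvASeedSide n k map r0 c0) s1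
  pvABfs n map (n * n + 1).toNat s2

def compute (n : Int) (k : Int) (map : List String) : Int :=
  (PySem.List.pyRange 0 (n - k + 1)).foldl (fun best r0 =>
    (PySem.List.pyRange 0 (n - k + 1)).foldl (fun b c0 =>
      max b (pvASquare n k map r0 c0)) best) 0

-- ===== PORT B =====
-- B's ok(x, y, r0, c0): inside the grid, not in the overwritten square, and free
def pvOk (n k : Int) (map : List String) (r0 c0 x y : Int) : Bool :=
  (0 ≤ x && x < n) && (0 ≤ y && y < n) &&
  !((r0 ≤ x && x < r0 + k) && (c0 ≤ y && y < c0 + k)) &&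
  pvDot map x y

-- the four orthogonal neighbours of a cell, in B's tuple order
def pvNbrs (p : Int × Int) : List (Int × Int) :=
  [(p.1 - 1, p.2), (p.1 + 1, p.2), (p.1, p.2 - 1), (p.1, p.2 + 1)]

-- B's seed phase: the free cells on the ring just outside the square, as a set
def pvBSeeds (n k : Int) (map : List String) (r0 c0 : Int) : PySem.Set (Int × Int) :=
  let v := (PySem.List.pyRange c0 (min (c0 + k) n)).foldl (fun v c =>
      [(r0 - 1, c), (r0 + k, c)].foldl
        (fun v p => if pvOk n k map r0 c0 p.1 p.2 then PySem.Set.add v p else v) v)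
      PySem.Set.empty
  (PySem.List.pyRange r0 (min (r0 + k) n)).foldl (fun v r =>
      [(r, c0 - 1), (r, c0 + k)].foldl
        (fun v p => if pvOk n k map r0 c0 p.1 p.2 then PySem.Set.add v p else v) v) v

-- B's one saturation round: every free neighbour of the whole set not seen yet
def pvBNew (n k : Int) (map : List String) (r0 c0 : Int)
    (vis : PySem.Set (Int × Int)) : PySem.Set (Int × Int) :=
  vis.foldl (fun nw p =>
    (pvNbrs p).foldl
      (fun nw q =>
        if pvOk n k map r0 c0 q.1 q.2 && !(PySem.Set.contains vis q) then PySem.Set.add nw q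
        else nw) nw) PySem.Set.empty

-- B's saturation loop (break when nothing new)
def pvBSat (n k : Int) (map : List String) (r0 c0 : Int) :
    Nat → PySem.Set (Int × Int) → PySem.Set (Int × Int)
  | 0, vis => vis
  | fuel + 1, vis =>
    let nw := pvBNew n k map r0 c0 vis
    if nw.isEmpty then vis else pvBSat n k map r0 c0 fuel (PySem.Set.union vis nw)

-- B's value for one placement
def pvBSquare (n k : Int) (map : List String) (r0 c0 : Int) : Int :=
  k * k + PySem.List.len
    (pvBSat n k map r0 c0 (n * n + 1).toNat (pvBSeeds n k map r0 c0))

def compute_alt (n : Int) (k : Int) (map : List String) : Int :=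
  (PySem.List.pyRange 0 (n - k + 1)).foldl (fun best r0 =>
    (PySem.List.pyRange 0 (n - k + 1)).foldl (fun b c0 =>
      max b (pvBSquare n k map r0 c0)) best) 0

-- ===== PRECONDITION & SPEC =====
-- Pre_ excludes the inputs on which A's BFS indexes outside map (IndexError): whenever
-- 1 ≤ k ≤ n the map must cover an n×n grid.  This can over-exclude degenerate inputs
-- (e.g. k = n, where no cell is ever probed and A returns k*k on any map).
def Pre_compute (n : Int) (k : Int) (map : List String) : Prop :=
  1 ≤ k → k ≤ n →
    (n ≤ (map.length : Int) ∧ ∀ s ∈ map.take n.toNat, n ≤ (s.toList.length : Int))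
instance (n : Int) (k : Int) (map : List String) : Decidable (Pre_compute n k map) := by
  unfold Pre_compute; infer_instance

def pvWitness_compute : Int × Int × List String := (2, 1, ["..", ".*"])

def Spec_compute (n : Int) (k : Int) (map : List String) (out : Int) : Prop := out = compute_alt n k map
instance (n : Int) (k : Int) (map : List String) (out : Int) : Decidable (Spec_compute n k map out) := by unfold Spec_compute; infer_instance

-- ===== CLAIM (what is proved, stated in full; the proofs are below) =====
def Claim_equal_compute : Prop := ∀ (n : Int) (k : Int) (map : List String), Dom_compute n k map → Pre_compute n k map → Spec_compute n k map (compute n k map)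

-- ===== LEMMAS AND PROOFS =====

-- the square region that gets overwritten
abbrev pvInSq (k r0 c0 : Int) (p : Int × Int) : Prop :=
  r0 ≤ p.1 ∧ p.1 < r0 + k ∧ c0 ≤ p.2 ∧ p.2 < c0 + k

-- added_to_queue is an n × n matrix
def pvShape (n : Int) (ad : List (List Bool)) : Prop :=
  ad.length = n.toNat ∧ ∀ row ∈ ad, row.length = n.toNat

theorem pvShape_mark (n : Int) (ad : List (List Bool)) (r c : Int) (h : pvShape n ad)
    (hr0 : 0 ≤ r) (hrn : r < n) : pvShape n (pvMark ad r c) := by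
  obtain ⟨h1, h2⟩ := h
  have hrow : PySem.List.pyGetD ad r [] ∈ ad := by
    apply PySem.List.pyGetD_mem
    constructor <;> omega
  constructor
  · rw [pvMark, PySem.List.length_pySetD, h1]
  · intro row hrow2
    rw [pvMark, PySem.List.pySetD_of_nonneg _ _ hr0] at hrow2
    rcases List.mem_or_eq_of_mem_set hrow2 with h | h
    · exact h2 _ h
    · subst h
      rw [PySem.List.length_pySetD]
      exact h2 _ hrow

theorem pvMget_mark (n : Int) (ad : List (List Bool)) (r c : Int) (h : pvShape n ad)
    (hr0 : 0 ≤ r) (hrn : r < n) (hc0 : 0 ≤ c) (hcn : c < n) (q : Int × Int)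
    (hq1 : 0 ≤ q.1) (hq2 : 0 ≤ q.2) :
    pvMget (pvMark ad r c) q.1 q.2 = if q = (r, c) then true else pvMget ad q.1 q.2 := by
  obtain ⟨h1, h2⟩ := h
  have hrow : PySem.List.pyGetD ad r [] ∈ ad := by
    apply PySem.List.pyGetD_mem; constructor <;> omega
  have hrlen : (PySem.List.pyGetD ad r []).length = n.toNat := h2 _ hrow
  have er : r = ((r.toNat : Nat) : Int) := by omega
  have ec : c = ((c.toNat : Nat) : Int) := by omega
  have eq1 : q.1 = ((q.1.toNat : Nat) : Int) := by omega
  have eq2 : q.2 = ((q.2.toNat : Nat) : Int) := by omega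
  rw [er] at hrlen
  rw [pvMget, pvMark, er, ec, eq1, eq2,
    PySem.List.pyGetD_pySetD_natCast _ _ _ _ _ (by omega)]
  by_cases hqr : q.1.toNat = r.toNat
  · rw [if_pos hqr]
    rw [PySem.List.pyGetD_pySetD_natCast _ _ _ _ _ (by omega)]
    by_cases hqc : q.2.toNat = c.toNat
    · rw [if_pos hqc]
      have hq : q = (((r.toNat : Nat) : Int), ((c.toNat : Nat) : Int)) := by
        apply Prod.ext <;> simp <;> omega
      rw [if_pos hq]
    · rw [if_neg hqc]
      have hq : ¬ q = (((r.toNat : Nat) : Int), ((c.toNat : Nat) : Int)) := by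
        intro hcon
        rw [hcon] at hqc
        exact hqc (by omega)
      rw [if_neg hq, pvMget, er, ← eq2, ← hqr]
      norm_cast
  · rw [if_neg hqr]
    have hq : ¬ q = (((r.toNat : Nat) : Int), ((c.toNat : Nat) : Int)) := by
      intro hcon
      rw [hcon] at hqr
      exact hqr (by omega)
    rw [if_neg hq, pvMget, ← eq2, ← eq1]

theorem pvMget_init (n : Int) (x y : Int) :
    pvMget ((PySem.List.pyRange 0 n).map (fun _ => List.replicate n.toNat false)) x y = false := by
  have hrow : ∀ (row : List Bool), row = List.replicate n.toNat false →
      PySem.List.pyGetD row y false = false := by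
    intro row hr
    subst hr
    rw [PySem.List.pyGetD]
    cases hb : PySem.List.pyGet? (List.replicate n.toNat false) y with
    | none => rfl
    | some b =>
      simp only [Option.getD_some]
      exact List.eq_of_mem_replicate (PySem.List.mem_of_pyGet?_eq_some _ hb)
  simp only [pvMget, PySem.List.pyGetD]
  cases hget : PySem.List.pyGet? ((PySem.List.pyRange 0 n).map (fun _ => List.replicate n.toNat false)) x with
  | none =>
    simp only [Option.getD_none]
    cases hb : PySem.List.pyGet? ([] : List Bool) y with
    | none => rfl
    | some b => exact absurd (PySem.List.mem_of_pyGet?_eq_some _ hb) (by simp)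
  | some row =>
    simp only [Option.getD_some]
    have hm := PySem.List.mem_of_pyGet?_eq_some _ hget
    simp only [List.mem_map] at hm
    obtain ⟨_, _, hr⟩ := hm
    have := hrow row hr.symm
    rw [PySem.List.pyGetD] at this
    exact this

theorem pvShape_init (n : Int) :
    pvShape n ((PySem.List.pyRange 0 n).map (fun _ => List.replicate n.toNat false)) := by
  constructor
  · rw [List.length_map, PySem.List.length_pyRange_one]; omega
  · intro row hrow
    simp at hrow
    rw [hrow.2, List.length_replicate]

-- marking a list of in-grid cells
theorem pvMarkFold (n : Int) (L : List (Int × Int))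
    (hb : ∀ p ∈ L, 0 ≤ p.1 ∧ p.1 < n ∧ 0 ≤ p.2 ∧ p.2 < n) :
    ∀ (ad : List (List Bool)), pvShape n ad →
      pvShape n (L.foldl (fun a p => pvMark a p.1 p.2) ad) ∧
      ∀ q : Int × Int, 0 ≤ q.1 → 0 ≤ q.2 →
        pvMget (L.foldl (fun a p => pvMark a p.1 p.2) ad) q.1 q.2
          = (pvMget ad q.1 q.2 || decide (q ∈ L)) := by
  induction L with
  | nil => exact fun ad hsh => ⟨hsh, fun q _ _ => by simp⟩
  | cons p t ih =>
    intro ad hsh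
    obtain ⟨hp1, hp2, hp3, hp4⟩ := hb p (List.mem_cons_self ..)
    have hsh' := pvShape_mark n ad p.1 p.2 hsh hp1 hp2
    obtain ⟨ihs, ihm⟩ := ih (fun x hx => hb x (List.mem_cons_of_mem _ hx)) (pvMark ad p.1 p.2) hsh'
    refine ⟨ihs, fun q hq1 hq2 => ?_⟩
    rw [List.foldl_cons, ihm q hq1 hq2,
      pvMget_mark n ad p.1 p.2 hsh hp1 hp2 hp3 hp4 q hq1 hq2]
    by_cases hqp : q = (p.1, p.2)
    · simp [hqp]
    · simp [hqp]

-- a nested fold of marks is the fold over the row-by-row list of cells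
theorem pvFoldNested {α : Type} (rows cols : List Int) (f : α → Int → Int → α) :
    ∀ (a : α),
      rows.foldl (fun ad r => cols.foldl (fun ad2 c => f ad2 r c) ad) a
        = (rows.flatMap (fun r => cols.map (fun c => (r, c)))).foldl
            (fun ad p => f ad p.1 p.2) a := by
  induction rows with
  | nil => intro a; rfl
  | cons r t ih =>
    intro a
    rw [List.foldl_cons, List.flatMap_cons, List.foldl_append, ih]
    congr 1
    rw [List.foldl_map]

-- after A's square-marking loops the matrix is the indicator of the square
theorem pvSquareMarked (n k r0 c0 : Int) (hr0 : 0 ≤ r0) (hr0n : r0 ≤ n - k)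
    (hc0 : 0 ≤ c0) (hc0n : c0 ≤ n - k) :
    pvShape n ((PySem.List.pyRange r0 (min (r0 + k) n)).foldl
      (fun ad row => (PySem.List.pyRange c0 (min (c0 + k) n)).foldl
        (fun ad2 col => pvMark ad2 row col) ad)
      ((PySem.List.pyRange 0 n).map (fun _ => List.replicate n.toNat false))) ∧
    ∀ q : Int × Int, 0 ≤ q.1 → 0 ≤ q.2 →
      pvMget ((PySem.List.pyRange r0 (min (r0 + k) n)).foldl
        (fun ad row => (PySem.List.pyRange c0 (min (c0 + k) n)).foldl
          (fun ad2 col => pvMark ad2 row col) ad)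
        ((PySem.List.pyRange 0 n).map (fun _ => List.replicate n.toNat false))) q.1 q.2
      = decide (pvInSq k r0 c0 q) := by
  have hmin1 : min (r0 + k) n = r0 + k := by omega
  have hmin2 : min (c0 + k) n = c0 + k := by omega
  rw [hmin1, hmin2, pvFoldNested]
  set L := (PySem.List.pyRange r0 (r0 + k)).flatMap
    (fun r => (PySem.List.pyRange c0 (c0 + k)).map (fun c => (r, c))) with hL
  have hmem : ∀ q : Int × Int, q ∈ L ↔ pvInSq k r0 c0 q := by
    intro q
    rw [hL]
    simp only [List.mem_flatMap, List.mem_map, PySem.List.mem_pyRange_one, pvInSq]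
    constructor
    · rintro ⟨r, ⟨hr1, hr2⟩, c, ⟨hc1, hc2⟩, hq⟩
      subst hq; exact ⟨hr1, hr2, hc1, hc2⟩
    · rintro ⟨h1, h2, h3, h4⟩
      exact ⟨q.1, ⟨h1, h2⟩, q.2, ⟨h3, h4⟩, rfl⟩
  have hb : ∀ p ∈ L, 0 ≤ p.1 ∧ p.1 < n ∧ 0 ≤ p.2 ∧ p.2 < n := by
    intro p hp
    have := (hmem p).1 hp
    rw [pvInSq] at this
    omega
  obtain ⟨hs, hm⟩ := pvMarkFold n L hb _ (pvShape_init n)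
  refine ⟨hs, fun q hq1 hq2 => ?_⟩
  rw [hm q hq1 hq2, pvMget_init]
  simp [hmem q]

-- joint invariant of A's and B's seed phases
def pvSeedInv (n k : Int) (map : List String) (r0 c0 : Int)
    (s : PvA) (vis : List (Int × Int)) : Prop :=
  s.qr.zip s.qc = vis ∧ s.qr.length = s.qc.length ∧ vis.Nodup ∧
  s.comp = k * k + vis.length ∧ pvShape n s.ad ∧
  (∀ q : Int × Int, 0 ≤ q.1 → q.1 < n → 0 ≤ q.2 → q.2 < n →
    pvMget s.ad q.1 q.2 = (decide (pvInSq k r0 c0 q) || vis.contains q)) ∧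
  (∀ p ∈ vis, pvOk n k map r0 c0 p.1 p.2 = true)

theorem pvOk_bounds {n k : Int} {map : List String} {r0 c0 x y : Int}
    (h : pvOk n k map r0 c0 x y = true) : 0 ≤ x ∧ x < n ∧ 0 ≤ y ∧ y < n := by
  simp only [pvOk, Bool.and_eq_true, decide_eq_true_eq] at h
  exact ⟨h.1.1.1.1, h.1.1.1.2, h.1.1.2.1, h.1.1.2.2⟩

-- one candidate cell of the seed phase, in both programs at once
theorem pvSeedStep (n k : Int) (map : List String) (r0 c0 : Int)
    (s : PvA) (vis : List (Int × Int)) (inv : pvSeedInv n k map r0 c0 s vis)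
    (p : Int × Int) (hnew : p ∉ vis) (g : Prop) [Decidable g]
    (hg : (decide g && pvDot map p.1 p.2) = pvOk n k map r0 c0 p.1 p.2) :
    pvSeedInv n k map r0 c0
      (if g then if pvDot map p.1 p.2 then
          ⟨s.qr ++ [p.1], s.qc ++ [p.2], pvMark s.ad p.1 p.2, s.comp + 1⟩ else s
        else s)
      (if pvOk n k map r0 c0 p.1 p.2 then PySem.Set.add vis p else vis) ∧
    ((if pvOk n k map r0 c0 p.1 p.2 then PySem.Set.add vis p else vis) = vis ∨
     (if pvOk n k map r0 c0 p.1 p.2 then PySem.Set.add vis p else vis) = vis ++ [p]) := by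
  obtain ⟨hzip, hlen, hnd, hcomp, hsh, hM, hok⟩ := inv
  by_cases hgp : g
  · rw [if_pos hgp]
    cases hdot : pvDot map p.1 p.2 with
    | false =>
      have hokf : pvOk n k map r0 c0 p.1 p.2 = false := by
        rw [← hg, hdot, Bool.and_false]
      rw [hokf, if_neg (by simp : ¬ (false = true))]
      exact ⟨⟨hzip, hlen, hnd, hcomp, hsh, hM, hok⟩, Or.inl rfl⟩
    | true =>
      have hokt : pvOk n k map r0 c0 p.1 p.2 = true := by
        rw [← hg, hdot, decide_eq_true hgp, Bool.and_true]
      obtain ⟨hb1, hb2, hb3, hb4⟩ := pvOk_bounds hokt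
      rw [hokt, if_pos rfl, if_pos rfl, PySem.Set.add_of_not_mem hnew]
      refine ⟨⟨?_, ?_, ?_, ?_, ?_, ?_, ?_⟩, Or.inr rfl⟩
      · rw [List.zip_append hlen, hzip]; rfl
      · simp [hlen]
      · have hdisj : vis.Disjoint [p] := by
          intro x hx hx2
          simp at hx2
          subst hx2
          exact hnew hx
        exact hnd.append (List.nodup_singleton _) hdisj
      · simp [hcomp]; ring
      · exact pvShape_mark n s.ad p.1 p.2 hsh hb1 hb2
      · intro q hq1 hq2 hq3 hq4
        rw [pvMget_mark n s.ad p.1 p.2 hsh hb1 hb2 hb3 hb4 q hq1 hq3]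
        by_cases hqp : q = p
        · subst hqp
          simp
        · rw [if_neg (by simpa using hqp), hM q hq1 hq2 hq3 hq4]
          have : (vis ++ [p]).contains q = vis.contains q := by simp [hqp]
          rw [this]
      · intro x hx
        rcases List.mem_append.1 hx with h | h
        · exact hok x h
        · simp at h; subst h; exact hokt
  · rw [if_neg hgp]
    have hokf : pvOk n k map r0 c0 p.1 p.2 = false := by
      rw [← hg, decide_eq_false hgp, Bool.false_and]
    rw [hokf, if_neg (by simp : ¬ (false = true))]
    exact ⟨⟨hzip, hlen, hnd, hcomp, hsh, hM, hok⟩, Or.inl rfl⟩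

-- A's first seed loop vs B's first seed loop (columns of the top and bottom ring rows)
theorem pvSeedTopPhase (n k : Int) (map : List String) (r0 c0 : Int)
    (hr0 : 0 ≤ r0) (hr0n : r0 ≤ n - k) (hc0 : 0 ≤ c0) (hc0n : c0 ≤ n - k) :
    ∀ (m : Nat) (c : Int), (c0 + k - c).toNat = m → c0 ≤ c →
    ∀ (s : PvA) (vis : List (Int × Int)), pvSeedInv n k map r0 c0 s vis →
      (∀ p ∈ vis, (p.1 = r0 - 1 ∨ p.1 = r0 + k) ∧ p.2 < c) →
      pvSeedInv n k map r0 c0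
        ((PySem.List.pyRange c (c0 + k)).foldl (pvASeedTop n k map r0 c0) s)
        ((PySem.List.pyRange c (c0 + k)).foldl (fun v cc =>
          [(r0 - 1, cc), (r0 + k, cc)].foldl
            (fun v p => if pvOk n k map r0 c0 p.1 p.2 then PySem.Set.add v p else v) v) vis) ∧
      (∀ p ∈ (PySem.List.pyRange c (c0 + k)).foldl (fun v cc =>
          [(r0 - 1, cc), (r0 + k, cc)].foldl
            (fun v p => if pvOk n k map r0 c0 p.1 p.2 then PySem.Set.add v p else v) v) vis,
        p.1 = r0 - 1 ∨ p.1 = r0 + k) := by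
  intro m
  induction m with
  | zero =>
    intro c hm hc s vis hinv hband
    rw [PySem.List.pyRange_one_eq_nil (by omega)]
    exact ⟨hinv, fun p hp => (hband p hp).1⟩
  | succ m ih =>
    intro c hm hc s vis hinv hband
    have hclt : c < c0 + k := by omega
    have hk : 1 ≤ k := by omega
    rw [PySem.List.pyRange_one_cons hclt, List.foldl_cons, List.foldl_cons]
    -- the two candidates of this column
    have hg1 : (decide (r0 - 1 ≥ 0) && pvDot map (r0 - 1) c) = pvOk n k map r0 c0 (r0 - 1) c := by
      by_cases hge : r0 - 1 ≥ 0
      · have hok : pvOk n k map r0 c0 (r0 - 1) c = pvDot map (r0 - 1) c := by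
          simp only [pvOk]
          rw [decide_eq_true (show (0:Int) ≤ r0 - 1 by omega),
              decide_eq_true (show r0 - 1 < n by omega),
              decide_eq_true (show (0:Int) ≤ c by omega),
              decide_eq_true (show c < n by omega),
              decide_eq_false (show ¬ (r0 ≤ r0 - 1) by omega)]
          simp
        rw [hok, decide_eq_true hge, Bool.true_and]
      · have hok : pvOk n k map r0 c0 (r0 - 1) c = false := by
          simp only [pvOk]
          rw [decide_eq_false (show ¬ ((0:Int) ≤ r0 - 1) by omega)]
          simp
        rw [hok, decide_eq_false hge, Bool.false_and]
    have hnew1 : (r0 - 1, c) ∉ vis := fun hmem => by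
      have := (hband _ hmem).2
      simp at this
    obtain ⟨hinv1, hcase1⟩ := pvSeedStep n k map r0 c0 s vis hinv (r0 - 1, c) hnew1
      (r0 - 1 ≥ 0) hg1
    set s1 := (if r0 - 1 ≥ 0 then if pvDot map (r0 - 1) c then
        (⟨s.qr ++ [r0 - 1], s.qc ++ [c], pvMark s.ad (r0 - 1) c, s.comp + 1⟩ : PvA) else s
      else s) with hs1
    set v1 := (if pvOk n k map r0 c0 (r0 - 1) c then PySem.Set.add vis (r0 - 1, c) else vis) with hv1
    have hband1 : ∀ p ∈ v1, (p.1 = r0 - 1 ∨ p.1 = r0 + k) ∧ p.2 ≤ c := by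
      intro p hp
      rcases hcase1 with h | h <;> rw [h] at hp
      · exact ⟨(hband p hp).1, le_of_lt (hband p hp).2⟩
      · rcases List.mem_append.1 hp with h' | h'
        · exact ⟨(hband p h').1, le_of_lt (hband p h').2⟩
        · simp at h'
          subst h'
          simp
    have hg2 : (decide (r0 + k < n) && pvDot map (r0 + k) c) = pvOk n k map r0 c0 (r0 + k) c := by
      by_cases hge : r0 + k < n
      · have hok : pvOk n k map r0 c0 (r0 + k) c = pvDot map (r0 + k) c := by
          simp only [pvOk]
          rw [decide_eq_true (show (0:Int) ≤ r0 + k by omega),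
              decide_eq_true (show r0 + k < n from hge),
              decide_eq_true (show (0:Int) ≤ c by omega),
              decide_eq_true (show c < n by omega),
              decide_eq_false (show ¬ (r0 + k < r0 + k) by omega)]
          simp
        rw [hok, decide_eq_true hge, Bool.true_and]
      · have hok : pvOk n k map r0 c0 (r0 + k) c = false := by
          simp only [pvOk]
          rw [decide_eq_false (show ¬ (r0 + k < n) from hge)]
          simp
        rw [hok, decide_eq_false hge, Bool.false_and]
    have hnew2 : (r0 + k, c) ∉ v1 := fun hmem => by
      rcases hcase1 with h | h <;> rw [h] at hmem
      · have := (hband _ hmem).2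
        simp at this
      · rcases List.mem_append.1 hmem with h' | h'
        · have := (hband _ h').2
          simp at this
        · simp at h'
          omega
    obtain ⟨hinv2, hcase2⟩ := pvSeedStep n k map r0 c0 s1 v1 hinv1 (r0 + k, c) hnew2
      (r0 + k < n) hg2
    have hstep : pvASeedTop n k map r0 c0 s c =
        (if r0 + k < n then if pvDot map (r0 + k) c then
          (⟨s1.qr ++ [r0 + k], s1.qc ++ [c], pvMark s1.ad (r0 + k) c, s1.comp + 1⟩ : PvA) else s1
        else s1) := by
      rw [pvASeedTop]
    rw [hstep]
    set v2 := (if pvOk n k map r0 c0 (r0 + k) c then PySem.Set.add v1 (r0 + k, c) else v1) with hv2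
    have hband2 : ∀ p ∈ v2, (p.1 = r0 - 1 ∨ p.1 = r0 + k) ∧ p.2 < c + 1 := by
      intro p hp
      rcases hcase2 with h | h <;> rw [h] at hp
      · exact ⟨(hband1 p hp).1, by have := (hband1 p hp).2; omega⟩
      · rcases List.mem_append.1 hp with h' | h'
        · exact ⟨(hband1 p h').1, by have := (hband1 p h').2; omega⟩
        · simp at h'
          subst h'
          exact ⟨Or.inr rfl, by omega⟩
    exact ih (c + 1) (by omega) (by omega) _ v2 hinv2 hband2

-- A's second seed loop vs B's second seed loop (rows of the left and right ring columns)
theorem pvSeedSidePhase (n k : Int) (map : List String) (r0 c0 : Int)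
    (hr0 : 0 ≤ r0) (hr0n : r0 ≤ n - k) (hc0 : 0 ≤ c0) (hc0n : c0 ≤ n - k) :
    ∀ (m : Nat) (r : Int), (r0 + k - r).toNat = m → r0 ≤ r →
    ∀ (s : PvA) (vis : List (Int × Int)), pvSeedInv n k map r0 c0 s vis →
      (∀ p ∈ vis, (p.1 = r0 - 1 ∨ p.1 = r0 + k) ∨
        ((p.2 = c0 - 1 ∨ p.2 = c0 + k) ∧ p.1 < r)) →
      pvSeedInv n k map r0 c0
        ((PySem.List.pyRange r (r0 + k)).foldl (pvASeedSide n k map r0 c0) s)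
        ((PySem.List.pyRange r (r0 + k)).foldl (fun v rr =>
          [(rr, c0 - 1), (rr, c0 + k)].foldl
            (fun v p => if pvOk n k map r0 c0 p.1 p.2 then PySem.Set.add v p else v) v) vis) := by
  intro m
  induction m with
  | zero =>
    intro r hm hr s vis hinv hband
    rw [PySem.List.pyRange_one_eq_nil (by omega)]
    exact hinv
  | succ m ih =>
    intro r hm hr s vis hinv hband
    have hrlt : r < r0 + k := by omega
    have hk : 1 ≤ k := by omega
    rw [PySem.List.pyRange_one_cons hrlt, List.foldl_cons, List.foldl_cons]
    have hg1 : (decide (c0 - 1 ≥ 0) && pvDot map r (c0 - 1)) = pvOk n k map r0 c0 r (c0 - 1) := by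
      by_cases hge : c0 - 1 ≥ 0
      · have hok : pvOk n k map r0 c0 r (c0 - 1) = pvDot map r (c0 - 1) := by
          simp only [pvOk]
          rw [decide_eq_true (show (0:Int) ≤ r by omega),
              decide_eq_true (show r < n by omega),
              decide_eq_true (show (0:Int) ≤ c0 - 1 by omega),
              decide_eq_true (show c0 - 1 < n by omega),
              decide_eq_false (show ¬ (c0 ≤ c0 - 1) by omega)]
          simp
        rw [hok, decide_eq_true hge, Bool.true_and]
      · have hok : pvOk n k map r0 c0 r (c0 - 1) = false := by
          simp only [pvOk]
          rw [decide_eq_false (show ¬ ((0:Int) ≤ c0 - 1) by omega)]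
          simp
        rw [hok, decide_eq_false hge, Bool.false_and]
    have hnew1 : (r, c0 - 1) ∉ vis := fun hmem => by
      rcases hband _ hmem with h | h
      · simp at h
        omega
      · have := h.2
        simp at this
    obtain ⟨hinv1, hcase1⟩ := pvSeedStep n k map r0 c0 s vis hinv (r, c0 - 1) hnew1
      (c0 - 1 ≥ 0) hg1
    set s1 := (if c0 - 1 ≥ 0 then if pvDot map r (c0 - 1) then
        (⟨s.qr ++ [r], s.qc ++ [c0 - 1], pvMark s.ad r (c0 - 1), s.comp + 1⟩ : PvA) else s
      else s) with hs1
    set v1 := (if pvOk n k map r0 c0 r (c0 - 1) then PySem.Set.add vis (r, c0 - 1) else vis) with hv1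
    have hband1 : ∀ p ∈ v1, (p.1 = r0 - 1 ∨ p.1 = r0 + k) ∨
        ((p.2 = c0 - 1 ∨ p.2 = c0 + k) ∧ p.1 ≤ r) := by
      intro p hp
      rcases hcase1 with h | h <;> rw [h] at hp
      · rcases hband p hp with h' | h'
        · exact Or.inl h'
        · exact Or.inr ⟨h'.1, le_of_lt h'.2⟩
      · rcases List.mem_append.1 hp with h' | h'
        · rcases hband p h' with h'' | h''
          · exact Or.inl h''
          · exact Or.inr ⟨h''.1, le_of_lt h''.2⟩
        · simp at h'
          subst h'
          exact Or.inr ⟨Or.inl rfl, le_refl r⟩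
    have hg2 : (decide (c0 + k < n) && pvDot map r (c0 + k)) = pvOk n k map r0 c0 r (c0 + k) := by
      by_cases hge : c0 + k < n
      · have hok : pvOk n k map r0 c0 r (c0 + k) = pvDot map r (c0 + k) := by
          simp only [pvOk]
          rw [decide_eq_true (show (0:Int) ≤ r by omega),
              decide_eq_true (show r < n by omega),
              decide_eq_true (show (0:Int) ≤ c0 + k by omega),
              decide_eq_true (show c0 + k < n from hge),
              decide_eq_false (show ¬ (c0 + k < c0 + k) by omega)]
          simp
        rw [hok, decide_eq_true hge, Bool.true_and]
      · have hok : pvOk n k map r0 c0 r (c0 + k) = false := by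
          simp only [pvOk]
          rw [decide_eq_false (show ¬ (c0 + k < n) from hge)]
          simp
        rw [hok, decide_eq_false hge, Bool.false_and]
    have hnew2 : (r, c0 + k) ∉ v1 := fun hmem => by
      rcases hcase1 with h | h <;> rw [h] at hmem
      · rcases hband _ hmem with h' | h'
        · simp at h'
          omega
        · have := h'.2
          simp at this
      · rcases List.mem_append.1 hmem with h' | h'
        · rcases hband _ h' with h'' | h''
          · simp at h''
            omega
          · have := h''.2
            simp at this
        · simp at h'
          omega
    obtain ⟨hinv2, hcase2⟩ := pvSeedStep n k map r0 c0 s1 v1 hinv1 (r, c0 + k) hnew2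
      (c0 + k < n) hg2
    have hstep : pvASeedSide n k map r0 c0 s r =
        (if c0 + k < n then if pvDot map r (c0 + k) then
          (⟨s1.qr ++ [r], s1.qc ++ [c0 + k], pvMark s1.ad r (c0 + k), s1.comp + 1⟩ : PvA) else s1
        else s1) := by
      rw [pvASeedSide]
    rw [hstep]
    set v2 := (if pvOk n k map r0 c0 r (c0 + k) then PySem.Set.add v1 (r, c0 + k) else v1) with hv2
    have hband2 : ∀ p ∈ v2, (p.1 = r0 - 1 ∨ p.1 = r0 + k) ∨
        ((p.2 = c0 - 1 ∨ p.2 = c0 + k) ∧ p.1 < r + 1) := by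
      intro p hp
      rcases hcase2 with h | h <;> rw [h] at hp
      · rcases hband1 p hp with h' | h'
        · exact Or.inl h'
        · exact Or.inr ⟨h'.1, by omega⟩
      · rcases List.mem_append.1 hp with h' | h'
        · rcases hband1 p h' with h'' | h''
          · exact Or.inl h''
          · exact Or.inr ⟨h''.1, by omega⟩
        · simp at h'
          subst h'
          exact Or.inr ⟨Or.inr rfl, by omega⟩
    exact ih (r + 1) (by omega) (by omega) _ v2 hinv2 hband2

theorem pvOk_iff (n k : Int) (map : List String) (r0 c0 x y : Int) :
    pvOk n k map r0 c0 x y = true ↔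
      ((0 ≤ x ∧ x < n ∧ 0 ≤ y ∧ y < n) ∧ ¬ pvInSq k r0 c0 (x, y) ∧ pvDot map x y = true) := by
  simp only [pvOk, pvInSq, Bool.and_eq_true, decide_eq_true_eq, Bool.not_eq_eq_eq_not,
    Bool.not_true, Bool.and_eq_false_iff, decide_eq_false_iff_not]
  constructor
  · rintro ⟨⟨⟨⟨h1, h2⟩, h3, h4⟩, h5⟩, h6⟩
    refine ⟨⟨h1, h2, h3, h4⟩, ?_, h6⟩
    rintro ⟨a1, a2, a3, a4⟩
    rcases h5 with h | h <;> rcases h with h | h <;> exact absurd (by omega) h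
  · rintro ⟨⟨h1, h2, h3, h4⟩, h5, h6⟩
    refine ⟨⟨⟨⟨h1, h2⟩, h3, h4⟩, ?_⟩, h6⟩
    by_cases ha : r0 ≤ x
    · by_cases hb : x < r0 + k
      · by_cases hc : c0 ≤ y
        · right; right
          intro hd
          exact h5 ⟨ha, hb, hc, hd⟩
        · right; left; exact hc
      · left; right; exact hb
    · left; left; exact ha

-- joint invariant of one BFS level in A and one saturation round in B
def pvJ (n k : Int) (map : List String) (r0 c0 : Int) (vis : List (Int × Int))
    (comp0 : Int) (ad0 : List (List Bool)) (acc : PvA) (nw : List (Int × Int)) : Prop :=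
  acc.qr.zip acc.qc = nw ∧ acc.qr.length = acc.qc.length ∧ nw.Nodup ∧
  (∀ q ∈ nw, pvOk n k map r0 c0 q.1 q.2 = true ∧ q ∉ vis) ∧
  acc.comp = comp0 + nw.length ∧ pvShape n acc.ad ∧
  (∀ q : Int × Int, 0 ≤ q.1 → q.1 < n → 0 ≤ q.2 → q.2 < n →
    pvMget acc.ad q.1 q.2 = (decide (pvInSq k r0 c0 q) || vis.contains q || nw.contains q))

-- one neighbour candidate, in both programs at once
theorem pvDirSync (n k : Int) (map : List String) (r0 c0 : Int)
    (vis : List (Int × Int)) (comp0 : Int) (ad0 : List (List Bool))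
    (acc : PvA) (nw : List (Int × Int))
    (hJ : pvJ n k map r0 c0 vis comp0 ad0 acc nw) (q : Int × Int) (g : Bool)
    (hg : g = true ↔ (0 ≤ q.1 ∧ q.1 < n ∧ 0 ≤ q.2 ∧ q.2 < n)) :
    pvJ n k map r0 c0 vis comp0 ad0
      (if g && !(pvMget acc.ad q.1 q.2) && pvDot map q.1 q.2 then
        ⟨acc.qr ++ [q.1], acc.qc ++ [q.2], pvMark acc.ad q.1 q.2, acc.comp + 1⟩ else acc)
      (if pvOk n k map r0 c0 q.1 q.2 && !(PySem.Set.contains vis q) then PySem.Set.add nw q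
       else nw) ∧
    (∀ x ∈ nw, x ∈ (if pvOk n k map r0 c0 q.1 q.2 && !(PySem.Set.contains vis q) then
        PySem.Set.add nw q else nw)) ∧
    (pvOk n k map r0 c0 q.1 q.2 = true → q ∈ vis ∨
      q ∈ (if pvOk n k map r0 c0 q.1 q.2 && !(PySem.Set.contains vis q) then
        PySem.Set.add nw q else nw)) := by
  obtain ⟨hzip, hlen, hnd, hmem, hcomp, hsh, hM⟩ := hJ
  by_cases hok : pvOk n k map r0 c0 q.1 q.2 = true
  · obtain ⟨⟨hb1, hb2, hb3, hb4⟩, hnsq, hdot⟩ := (pvOk_iff n k map r0 c0 q.1 q.2).1 (by simpa using hok)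
    by_cases hqv : q ∈ vis
    · -- already in vis: both sides do nothing
      have hBc : (pvOk n k map r0 c0 q.1 q.2 && !(PySem.Set.contains vis q)) = false := by
        simp [PySem.Set.contains, hqv]
      have hAc : (g && !(pvMget acc.ad q.1 q.2) && pvDot map q.1 q.2) = false := by
        rw [hM q hb1 hb2 hb3 hb4, (by simpa using hqv : vis.contains q = true)]
        simp
      rw [hBc, hAc, if_neg (by simp), if_neg (by simp)]
      exact ⟨⟨hzip, hlen, hnd, hmem, hcomp, hsh, hM⟩, fun x hx => hx, fun _ => Or.inl hqv⟩
    · by_cases hqn : q ∈ nw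
      · -- already produced this round: both sides do nothing
        have hBc : (pvOk n k map r0 c0 q.1 q.2 && !(PySem.Set.contains vis q)) = true := by
          simp [hok, PySem.Set.contains, hqv]
        have hAc : (g && !(pvMget acc.ad q.1 q.2) && pvDot map q.1 q.2) = false := by
          rw [hM q hb1 hb2 hb3 hb4, (by simpa using hqn : nw.contains q = true)]
          simp
        rw [hBc, hAc, if_neg (by simp), if_pos rfl, PySem.Set.add_of_mem hqn]
        exact ⟨⟨hzip, hlen, hnd, hmem, hcomp, hsh, hM⟩, fun x hx => hx, fun _ => Or.inr hqn⟩
      · -- genuinely new: both sides add q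
        have hBc : (pvOk n k map r0 c0 q.1 q.2 && !(PySem.Set.contains vis q)) = true := by
          simp [hok, PySem.Set.contains, hqv]
        have hAc : (g && !(pvMget acc.ad q.1 q.2) && pvDot map q.1 q.2) = true := by
          rw [hM q hb1 hb2 hb3 hb4, hg.2 ⟨hb1, hb2, hb3, hb4⟩, hdot,
            (by simpa using hqv : vis.contains q = false),
            (by simpa using hqn : nw.contains q = false),
            decide_eq_false hnsq]
          simp
        rw [hBc, hAc, if_pos rfl, if_pos rfl, PySem.Set.add_of_not_mem hqn]
        refine ⟨⟨?_, ?_, ?_, ?_, ?_, ?_, ?_⟩, fun x hx => List.mem_append_left _ hx,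
          fun _ => Or.inr (List.mem_append_right _ (by simp))⟩
        · rw [List.zip_append hlen, hzip]; rfl
        · simp [hlen]
        · have hdisj : nw.Disjoint [q] := by
            intro x hx hx2
            simp at hx2
            subst hx2
            exact hqn hx
          exact hnd.append (List.nodup_singleton _) hdisj
        · intro x hx
          rcases List.mem_append.1 hx with h | h
          · exact hmem x h
          · simp at h; subst h; exact ⟨hok, hqv⟩
        · simp [hcomp]; ring
        · exact pvShape_mark n acc.ad q.1 q.2 hsh hb1 hb2
        · intro x hx1 hx2 hx3 hx4
          rw [pvMget_mark n acc.ad q.1 q.2 hsh hb1 hb2 hb3 hb4 x hx1 hx3]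
          by_cases hxq : x = q
          · subst hxq
            simp
          · rw [if_neg (by simpa using hxq), hM x hx1 hx2 hx3 hx4]
            have : (nw ++ [q]).contains x = nw.contains x := by simp [hxq]
            rw [this]
  · -- not a free cell outside the square: both sides do nothing
    have hokf : pvOk n k map r0 c0 q.1 q.2 = false := by
      cases h : pvOk n k map r0 c0 q.1 q.2
      · rfl
      · exact absurd h hok
    have hBc : (pvOk n k map r0 c0 q.1 q.2 && !(PySem.Set.contains vis q)) = false := by
      rw [hokf]; simp
    have hAc : (g && !(pvMget acc.ad q.1 q.2) && pvDot map q.1 q.2) = false := by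
      cases hgv : g
      · simp
      · obtain ⟨hb1, hb2, hb3, hb4⟩ := hg.1 hgv
        cases hMv : pvMget acc.ad q.1 q.2
        · cases hdot : pvDot map q.1 q.2
          · simp
          · -- q would be ok, contradiction
            exfalso
            rw [hM q hb1 hb2 hb3 hb4] at hMv
            simp only [Bool.or_eq_false_iff, decide_eq_false_iff_not] at hMv
            exact hok ((pvOk_iff n k map r0 c0 q.1 q.2).2 ⟨⟨hb1, hb2, hb3, hb4⟩, hMv.1.1, hdot⟩)
        · simp
    rw [hBc, hAc, if_neg (by simp), if_neg (by simp)]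
    exact ⟨⟨hzip, hlen, hnd, hmem, hcomp, hsh, hM⟩, fun x hx => hx,
      fun h => absurd h (by rw [hokf]; simp)⟩

-- processing one queue element in A = processing one visited element in B
theorem pvStepSync (n k : Int) (map : List String) (r0 c0 : Int)
    (vis : List (Int × Int)) (comp0 : Int) (ad0 : List (List Bool))
    (p : Int × Int) (hp : pvOk n k map r0 c0 p.1 p.2 = true)
    (acc : PvA) (nw : List (Int × Int)) (hJ : pvJ n k map r0 c0 vis comp0 ad0 acc nw) :
    pvJ n k map r0 c0 vis comp0 ad0 (pvAStepXY n map p.1 p.2 acc)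
      ((pvNbrs p).foldl (fun nw q =>
        if pvOk n k map r0 c0 q.1 q.2 && !(PySem.Set.contains vis q) then PySem.Set.add nw q
        else nw) nw) ∧
    (∀ x ∈ nw, x ∈ (pvNbrs p).foldl (fun nw q =>
        if pvOk n k map r0 c0 q.1 q.2 && !(PySem.Set.contains vis q) then PySem.Set.add nw q
        else nw) nw) ∧
    (∀ q ∈ pvNbrs p, pvOk n k map r0 c0 q.1 q.2 = true →
      q ∈ vis ∨ q ∈ (pvNbrs p).foldl (fun nw q =>
        if pvOk n k map r0 c0 q.1 q.2 && !(PySem.Set.contains vis q) then PySem.Set.add nw q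
        else nw) nw) := by
  obtain ⟨⟨hb1, hb2, hb3, hb4⟩, -, -⟩ := (pvOk_iff n k map r0 c0 p.1 p.2).1 hp
  simp only [pvAStepXY, pvNbrs, List.foldl_cons, List.foldl_nil]
  obtain ⟨hJ1, hm1, hc1⟩ := pvDirSync n k map r0 c0 vis comp0 ad0 acc nw hJ
    (p.1 - 1, p.2) (decide (p.1 > 0))
    (by simp only [decide_eq_true_eq]; omega)
  obtain ⟨hJ2, hm2, hc2⟩ := pvDirSync n k map r0 c0 vis comp0 ad0 _ _ hJ1
    (p.1 + 1, p.2) (decide (p.1 + 1 < n))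
    (by simp only [decide_eq_true_eq]; omega)
  obtain ⟨hJ3, hm3, hc3⟩ := pvDirSync n k map r0 c0 vis comp0 ad0 _ _ hJ2
    (p.1, p.2 - 1) (decide (p.2 > 0))
    (by simp only [decide_eq_true_eq]; omega)
  obtain ⟨hJ4, hm4, hc4⟩ := pvDirSync n k map r0 c0 vis comp0 ad0 _ _ hJ3
    (p.1, p.2 + 1) (decide (p.2 + 1 < n))
    (by simp only [decide_eq_true_eq]; omega)
  refine ⟨hJ4, ?_, ?_⟩
  · intro x hx
    exact hm4 _ (hm3 _ (hm2 _ (hm1 _ hx)))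
  · intro q hq hqok
    simp only [List.mem_cons, List.not_mem_nil, or_false] at hq
    rcases hq with h | h | h | h <;> subst h
    · rcases hc1 hqok with h' | h'
      · exact Or.inl h'
      · exact Or.inr (hm4 _ (hm3 _ (hm2 _ h')))
    · rcases hc2 hqok with h' | h'
      · exact Or.inl h'
      · exact Or.inr (hm4 _ (hm3 _ h'))
    · rcases hc3 hqok with h' | h'
      · exact Or.inl h'
      · exact Or.inr (hm4 _ h')
    · rcases hc4 hqok with h' | h'
      · exact Or.inl h'
      · exact Or.inr h'

-- processing a whole queue in A = processing the same cells in B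
theorem pvLevelFoldSync (n k : Int) (map : List String) (r0 c0 : Int)
    (vis : List (Int × Int)) (comp0 : Int) (ad0 : List (List Bool))
    (hvisOk : ∀ p ∈ vis, pvOk n k map r0 c0 p.1 p.2 = true) :
    ∀ (F : List (Int × Int)), (∀ p ∈ F, p ∈ vis) →
    ∀ (acc : PvA) (nw : List (Int × Int)), pvJ n k map r0 c0 vis comp0 ad0 acc nw →
      pvJ n k map r0 c0 vis comp0 ad0
        (F.foldl (fun a p => pvAStepXY n map p.1 p.2 a) acc)
        (F.foldl (fun nw p => (pvNbrs p).foldl (fun nw q =>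
          if pvOk n k map r0 c0 q.1 q.2 && !(PySem.Set.contains vis q) then PySem.Set.add nw q
          else nw) nw) nw) ∧
      (∀ x ∈ nw, x ∈ F.foldl (fun nw p => (pvNbrs p).foldl (fun nw q =>
          if pvOk n k map r0 c0 q.1 q.2 && !(PySem.Set.contains vis q) then PySem.Set.add nw q
          else nw) nw) nw) ∧
      (∀ p ∈ F, ∀ q ∈ pvNbrs p, pvOk n k map r0 c0 q.1 q.2 = true →
        q ∈ vis ∨ q ∈ F.foldl (fun nw p => (pvNbrs p).foldl (fun nw q =>
          if pvOk n k map r0 c0 q.1 q.2 && !(PySem.Set.contains vis q) then PySem.Set.add nw q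
          else nw) nw) nw) := by
  intro F
  induction F with
  | nil =>
    intro hF acc nw hJ
    exact ⟨hJ, fun x hx => hx, fun p hp => absurd hp (List.not_mem_nil)⟩
  | cons p t ih =>
    intro hF acc nw hJ
    obtain ⟨hJ1, hm1, hc1⟩ := pvStepSync n k map r0 c0 vis comp0 ad0 p
      (hvisOk p (hF p (List.mem_cons_self ..))) acc nw hJ
    obtain ⟨hJ2, hm2, hc2⟩ := ih (fun x hx => hF x (List.mem_cons_of_mem _ hx)) _ _ hJ1
    simp only [List.foldl_cons]
    refine ⟨hJ2, fun x hx => hm2 _ (hm1 _ hx), ?_⟩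
    intro x hx q hq hqok
    rcases List.mem_cons.1 hx with h | h
    · subst h
      rcases hc1 q hq hqok with h' | h'
      · exact Or.inl h'
      · exact Or.inr (hm2 _ h')
    · exact hc2 x h q hq hqok

-- A's "for i in range(len(queue_col))" over two parallel lists is a fold over their zip
theorem pvZipFold {β : Type} (f : Int → Int → β → β) :
    ∀ (qc qr : List Int), qr.length = qc.length → ∀ (init : β),
      (PySem.List.pyRange 0 (PySem.List.len qc)).foldl
        (fun acc i => f (PySem.List.pyGetD qr i 0) (PySem.List.pyGetD qc i 0) acc) init
      = (qr.zip qc).foldl (fun acc p => f p.1 p.2 acc) init := by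
  intro qc
  induction qc using List.reverseRecOn with
  | nil =>
    intro qr hlen init
    have : qr = [] := List.eq_nil_of_length_eq_zero hlen
    subst this
    rfl
  | append_singleton t y ih =>
    intro qr hlen init
    rcases List.eq_nil_or_concat qr with h | ⟨t', x, h⟩
    · subst h
      simp at hlen
    · subst h
      simp only [List.concat_eq_append] at hlen ⊢
      have hlen' : t'.length = t.length := by
        simp at hlen
        omega
      have hrange : PySem.List.pyRange 0 (PySem.List.len (t ++ [y]))
          = PySem.List.pyRange 0 (PySem.List.len t) ++ [PySem.List.len t] := by
        rw [PySem.List.len_eq, PySem.List.len_eq]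
        simp only [List.length_append, List.length_cons, List.length_nil]
        push_cast
        rw [PySem.List.pyRange_one_succ_right (by positivity)]
      rw [hrange, List.foldl_append]
      have hcongr : (PySem.List.pyRange 0 (PySem.List.len t)).foldl
          (fun acc i => f (PySem.List.pyGetD (t' ++ [x]) i 0) (PySem.List.pyGetD (t ++ [y]) i 0) acc) init
          = (PySem.List.pyRange 0 (PySem.List.len t)).foldl
          (fun acc i => f (PySem.List.pyGetD t' i 0) (PySem.List.pyGetD t i 0) acc) init := by
        apply PySem.List.foldl_congr_mem
        intro acc i hi
        rw [PySem.List.mem_pyRange_one, PySem.List.len_eq] at hi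
        have hi1 : i < (t'.length : Int) := by rw [hlen']; exact hi.2
        have hi2 : i < ((t' ++ [x]).length : Int) := by simp; omega
        have hi3 : i < ((t ++ [y]).length : Int) := by simp; omega
        have h1 : PySem.List.pyGetD (t' ++ [x]) i 0 = PySem.List.pyGetD t' i 0 := by
          rw [PySem.List.pyGetD_eq_getElem _ _ hi.1 hi2,
              PySem.List.pyGetD_eq_getElem _ _ hi.1 hi1,
              List.getElem_append_left]
        have h2 : PySem.List.pyGetD (t ++ [y]) i 0 = PySem.List.pyGetD t i 0 := by
          rw [PySem.List.pyGetD_eq_getElem _ _ hi.1 hi3,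
              PySem.List.pyGetD_eq_getElem _ _ hi.1 hi.2,
              List.getElem_append_left]
        rw [h1, h2]
      rw [hcongr, ih t' hlen' init]
      have hx : PySem.List.pyGetD (t' ++ [x]) (PySem.List.len t) 0 = x := by
        rw [PySem.List.len_eq, ← hlen', PySem.List.pyGetD]
        rw [PySem.List.pyGet?_append_length t' [] x]
        rfl
      have hy : PySem.List.pyGetD (t ++ [y]) (PySem.List.len t) 0 = y := by
        rw [PySem.List.len_eq, PySem.List.pyGetD]
        rw [PySem.List.pyGet?_append_length t [] y]
        rfl
      rw [List.foldl_cons, List.foldl_nil, hx, hy, List.zip_append hlen', List.foldl_append]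
      rfl

-- the main relation between A's BFS state and B's visited set
def pvR (n k : Int) (map : List String) (r0 c0 : Int)
    (s : PvA) (vis : List (Int × Int)) : Prop :=
  s.qr.length = s.qc.length ∧
  (∃ pre, vis = pre ++ s.qr.zip s.qc ∧
    ∀ p ∈ pre, ∀ q ∈ pvNbrs p, pvOk n k map r0 c0 q.1 q.2 = true → q ∈ vis) ∧
  vis.Nodup ∧
  (∀ p ∈ vis, pvOk n k map r0 c0 p.1 p.2 = true) ∧
  s.comp = k * k + vis.length ∧
  pvShape n s.ad ∧
  (∀ q : Int × Int, 0 ≤ q.1 → q.1 < n → 0 ≤ q.2 → q.2 < n →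
    pvMget s.ad q.1 q.2 = (decide (pvInSq k r0 c0 q) || vis.contains q))

-- one level of A's BFS against one saturation round of B
theorem pvRound (n k : Int) (map : List String) (r0 c0 : Int)
    (s : PvA) (vis : List (Int × Int)) (hR : pvR n k map r0 c0 s vis) :
    pvJ n k map r0 c0 vis s.comp s.ad (pvALevel n map s) (pvBNew n k map r0 c0 vis) ∧
    (∀ p ∈ s.qr.zip s.qc, ∀ q ∈ pvNbrs p, pvOk n k map r0 c0 q.1 q.2 = true →
      q ∈ vis ∨ q ∈ pvBNew n k map r0 c0 vis) := by
  obtain ⟨hlen, ⟨pre, hpre, hclo⟩, hnd, hok, hcomp, hsh, hM⟩ := hR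
  -- B's round ignores the already-closed prefix
  have hnoop : ∀ (nw : List (Int × Int)), ∀ p ∈ pre,
      (pvNbrs p).foldl (fun nw q =>
        if pvOk n k map r0 c0 q.1 q.2 && !(PySem.Set.contains vis q) then PySem.Set.add nw q
        else nw) nw = nw := by
    intro nw p hp
    rw [PySem.List.foldl_congr_mem _ _ (fun acc _ => acc) nw ?_, PySem.List.foldl_ignore]
    intro acc q hq
    cases hokq : pvOk n k map r0 c0 q.1 q.2 with
    | false => simp
    | true =>
      have hqvis : q ∈ vis := hclo p hp q hq hokq
      have : PySem.Set.contains vis q = true := by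
        simpa [PySem.Set.contains] using hqvis
      rw [this]
      simp
  have hBnew : pvBNew n k map r0 c0 vis
      = (s.qr.zip s.qc).foldl (fun nw p => (pvNbrs p).foldl (fun nw q =>
          if pvOk n k map r0 c0 q.1 q.2 && !(PySem.Set.contains vis q) then PySem.Set.add nw q
          else nw) nw) [] := by
    rw [pvBNew, congrArg (fun l => List.foldl (fun nw p => (pvNbrs p).foldl (fun nw q =>
          if pvOk n k map r0 c0 q.1 q.2 && !(PySem.Set.contains vis q) then PySem.Set.add nw q
          else nw) nw) (PySem.Set.empty : PySem.Set (Int × Int)) l) hpre]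
    rw [List.foldl_append,
      PySem.List.foldl_congr_mem pre _ (fun acc _ => acc) _ (fun acc x hx => hnoop acc x hx),
      PySem.List.foldl_ignore]
    rfl
  have hsub : ∀ p ∈ s.qr.zip s.qc, p ∈ vis := by
    intro p hp
    rw [hpre]
    exact List.mem_append_right _ hp
  have hJ0 : pvJ n k map r0 c0 vis s.comp s.ad (⟨[], [], s.ad, s.comp⟩ : PvA) [] := by
    refine ⟨rfl, rfl, List.nodup_nil, fun q hq => absurd hq (List.not_mem_nil), by simp, hsh, ?_⟩
    intro q h1 h2 h3 h4
    rw [hM q h1 h2 h3 h4]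
    simp
  have hALevel : pvALevel n map s
      = (s.qr.zip s.qc).foldl (fun a p => pvAStepXY n map p.1 p.2 a) ⟨[], [], s.ad, s.comp⟩ := by
    rw [pvALevel, pvZipFold (fun x y acc => pvAStepXY n map x y acc) s.qc s.qr hlen]
  obtain ⟨hJ, hmono, hcov⟩ := pvLevelFoldSync n k map r0 c0 vis s.comp s.ad hok
    (s.qr.zip s.qc) hsub ⟨[], [], s.ad, s.comp⟩ [] hJ0
  rw [hALevel, hBnew]
  exact ⟨hJ, hcov⟩

theorem pvABfs_empty (n : Int) (map : List String) (fuel : Nat) (s : PvA) (h : s.qc = []) :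
    pvABfs n map fuel s = s.comp := by
  cases fuel with
  | zero => rfl
  | succ f =>
    rw [pvABfs, if_neg]
    rw [h]
    simp [PySem.List.len]

-- A's BFS and B's saturation agree step for step on related states
theorem pvBfsSync (n k : Int) (map : List String) (r0 c0 : Int) :
    ∀ (fuel : Nat) (s : PvA) (vis : List (Int × Int)), pvR n k map r0 c0 s vis →
      pvABfs n map fuel s = k * k + PySem.List.len (pvBSat n k map r0 c0 fuel vis) := by
  intro fuel
  induction fuel with
  | zero =>
    intro s vis hR
    rw [pvABfs, pvBSat, PySem.List.len_eq]
    exact hR.2.2.2.2.1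
  | succ f ih =>
    intro s vis hR
    obtain ⟨hJall, hcov⟩ := pvRound n k map r0 c0 s vis hR
    obtain ⟨hzip', hlen', hnd', hmem', hcomp', hsh', hM'⟩ := hJall
    obtain ⟨hlen, ⟨pre, hpre, hclo⟩, hnd, hok, hcomp, hsh, hM⟩ := hR
    by_cases hqc : s.qc = []
    · -- A's queue is empty: A stops, B finds nothing new
      have hA : pvABfs n map (f + 1) s = s.comp := pvABfs_empty n map (f + 1) s hqc
      have hAL : pvALevel n map s = ⟨[], [], s.ad, s.comp⟩ := by
        rw [pvALevel, hqc]
        rw [show PySem.List.len ([] : List Int) = 0 from rfl,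
          PySem.List.pyRange_one_eq_nil (by omega)]
        rfl
      have hnw : pvBNew n k map r0 c0 vis = [] := by
        have := hzip'
        rw [hAL] at this
        exact this.symm
      rw [hA, pvBSat]
      simp only [hnw, List.isEmpty_nil, if_pos]
      rw [PySem.List.len_eq]
      exact hcomp
    · have hlenpos : PySem.List.len s.qc > 0 := by
        rw [PySem.List.len_eq]
        cases hb : s.qc with
        | nil => exact absurd hb hqc
        | cons a t => simp
      rw [pvABfs, if_pos hlenpos, pvBSat]
      by_cases hnw : pvBNew n k map r0 c0 vis = []
      · -- nothing new: B stops, A does one empty level and stops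
        simp only [hnw, List.isEmpty_nil, if_pos]
        have hqc' : (pvALevel n map s).qc = [] := by
          have hz := hzip'
          rw [hnw] at hz
          rcases List.zip_eq_nil_iff.1 hz with h | h
          · have := hlen'
            rw [h] at this
            exact List.eq_nil_of_length_eq_zero this.symm
          · exact h
        rw [pvABfs_empty n map f _ hqc', hcomp', hnw, hcomp, PySem.List.len_eq]
        simp
      · have hBne : (pvBNew n k map r0 c0 vis).isEmpty = false := by
          cases hb : pvBNew n k map r0 c0 vis with
          | nil => exact absurd hb hnw
          | cons a t => rfl
        rw [hBne, if_neg (by simp)]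
        have hdisj : ∀ x ∈ pvBNew n k map r0 c0 vis, x ∉ vis := fun x hx => (hmem' x hx).2
        have hunion : PySem.Set.union vis (pvBNew n k map r0 c0 vis)
            = vis ++ pvBNew n k map r0 c0 vis :=
          PySem.Set.update_eq_append_of_disjoint vis _ hnd' hdisj
        rw [hunion]
        apply ih
        -- re-establish the relation for the next round
        refine ⟨hlen', ⟨vis, ⟨by rw [hzip'], ?_⟩⟩, ?_, ?_, ?_, hsh', ?_⟩
        · intro p hp q hq hokq
          rcases (by rw [hpre] at hp; exact List.mem_append.1 hp) with h | h
          · exact List.mem_append_left _ (hclo p h q hq hokq)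
          · rcases hcov p h q hq hokq with h' | h'
            · exact List.mem_append_left _ h'
            · exact List.mem_append_right _ h'
        · refine hnd.append hnd' ?_
          intro x hx hx2
          exact (hmem' x hx2).2 hx
        · intro p hp
          rcases List.mem_append.1 hp with h | h
          · exact hok p h
          · exact (hmem' p h).1
        · rw [hcomp', hcomp, List.length_append]
          push_cast
          ring
        · intro q h1 h2 h3 h4
          rw [hM' q h1 h2 h3 h4, List.contains_append, Bool.or_assoc]

-- the two programs agree on every placement of the square
theorem pvSquareEq (n k : Int) (map : List String) (r0 c0 : Int)
    (hr0 : 0 ≤ r0) (hr0n : r0 ≤ n - k) (hc0 : 0 ≤ c0) (hc0n : c0 ≤ n - k) :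
    pvASquare n k map r0 c0 = pvBSquare n k map r0 c0 := by
  obtain ⟨hsh1, hm1⟩ := pvSquareMarked n k r0 c0 hr0 hr0n hc0 hc0n
  have hinv0 : pvSeedInv n k map r0 c0
      ⟨[], [], (PySem.List.pyRange r0 (min (r0 + k) n)).foldl
        (fun ad row => (PySem.List.pyRange c0 (min (c0 + k) n)).foldl
          (fun ad2 col => pvMark ad2 row col) ad)
        ((PySem.List.pyRange 0 n).map (fun _ => List.replicate n.toNat false)), k * k⟩ [] := by
    refine ⟨rfl, rfl, List.nodup_nil, by simp, hsh1, ?_, by simp⟩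
    intro q h1 h2 h3 h4
    rw [hm1 q h1 h3]
    simp
  have hmc : min (c0 + k) n = c0 + k := by omega
  have hmr : min (r0 + k) n = r0 + k := by omega
  rw [hmc, hmr] at hinv0
  obtain ⟨hinv1, hband1⟩ := pvSeedTopPhase n k map r0 c0 hr0 hr0n hc0 hc0n
    (c0 + k - c0).toNat c0 rfl le_rfl _ [] hinv0 (by simp)
  have hinv2 := pvSeedSidePhase n k map r0 c0 hr0 hr0n hc0 hc0n
    (r0 + k - r0).toNat r0 rfl le_rfl _ _ hinv1 (fun p hp => Or.inl (hband1 p hp))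
  obtain ⟨hzip, hlen, hnd, hcomp, hsh, hM, hok⟩ := hinv2
  rw [pvASquare, pvBSquare, pvBSeeds, hmc, hmr]
  rw [show (PySem.Set.empty : PySem.Set (Int × Int)) = [] from rfl]
  apply pvBfsSync
  refine ⟨hlen, ⟨[], by simpa using hzip.symm, fun p hp => absurd hp (List.not_mem_nil)⟩,
    hnd, hok, hcomp, hsh, hM⟩

-- ===== VERDICT (by name: the statement is the Claim_ definition above) =====
theorem compute_spec : Claim_equal_compute := by
  intro n k map hdom hpre
  unfold Spec_compute
  rw [compute, compute_alt]
  apply PySem.List.foldl_congr_mem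
  intro best r0 hr0
  apply PySem.List.foldl_congr_mem
  intro b c0 hc0
  rw [PySem.List.mem_pyRange_one] at hr0 hc0
  rw [pvSquareEq n k map r0 c0 hr0.1 (by omega) hc0.1 (by omega)]
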